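-- pv_equiv track=rewrite | github.com/ivan-si/VulnLLM | analyze_function_changes.py | extract_methods_map
-- ===== SOURCE A (Python) =====
-- def extract_methods_map(code_block):
--     """
--     Extracts methods from a code block and maps their signatures (def lines) to the method content.
--     """
--     methods = {}
--     lines = code_block.split("\n")
--     current_method = None
--     method_content = []
--
--     for line in lines:
--         stripped = line.strip()
--         if stripped.startswith("def "):  # New method starts
--             if current_method:  # Save the previous method
--                 methods[current_method] = "\n".join(method_content)
--             current_method = stripped  # Start a new method
--             method_content = [line]
--         elif current_method and stripped:  # Part of a current method
--             method_content.append(line)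
--
--     # Save the last method
--     if current_method:
--         methods[current_method] = "\n".join(method_content)
--
--     return methods
-- ===== SOURCE B (Python) =====
-- def extract_methods_map(code_block):
--     """Parser-style re-implementation: skip the prefix before the first def
--     line, then repeatedly consume one header plus its non-blank body lines."""
--     lines = code_block.split("\n")
--     # skip everything before the first def line
--     while lines and not lines[0].strip().startswith("def "):
--         lines.pop(0)
--     methods = {}
--     while lines:
--         header = lines.pop(0)
--         body = [header]
--         while lines and not lines[0].strip().startswith("def "):
--             line = lines.pop(0)
--             if line.strip():
--                 body.append(line)
--         methods[header.strip()] = "\n".join(body)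
--     return methods
-- ===== Notes on version B (the rewrite author's own statement) =====
-- stated objective: alternative
-- what changed: A's single pass with current_method/method_content state variables and a trailing save is replaced by a parser-style decomposition: skip lines before the first def, then an outer loop that consumes one def header plus its non-blank body lines per iteration and inserts that method directly.
import Mathlib
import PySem

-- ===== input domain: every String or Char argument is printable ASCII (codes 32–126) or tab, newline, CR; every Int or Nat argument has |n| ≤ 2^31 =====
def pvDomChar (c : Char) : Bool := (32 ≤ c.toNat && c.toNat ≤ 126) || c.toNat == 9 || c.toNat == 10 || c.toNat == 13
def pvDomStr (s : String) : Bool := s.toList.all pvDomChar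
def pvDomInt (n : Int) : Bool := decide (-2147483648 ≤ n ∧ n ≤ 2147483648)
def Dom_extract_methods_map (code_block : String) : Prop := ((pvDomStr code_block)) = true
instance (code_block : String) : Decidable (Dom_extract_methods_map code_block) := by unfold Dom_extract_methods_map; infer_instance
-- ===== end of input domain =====

-- B replaces A's one-pass state machine (current_method/method_content accumulators) by a
-- parser-style decomposition: skip the prefix, then repeatedly consume one header and its body
-- (objective: alternative; same cost).

-- ===== PORT A =====
-- the body of A's for-loop, step for step
def pvStepA (st : PySem.Dict String String × Option String × List String) (line : String) :
    PySem.Dict String String × Option String × List String :=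
  let (methods, current, content) := st
  let stripped := PySem.Str.strip line
  if PySem.Str.startswith stripped "def " then
    let methods := match current with
      | some cm => methods.insert cm (PySem.Str.join "\n" content)
      | none => methods
    (methods, some stripped, [line])
  else if current.isSome && (stripped != "") then
    (methods, current, content ++ [line])
  else
    (methods, current, content)

-- the trailing "save the last method" step
def pvFinA (st : PySem.Dict String String × Option String × List String) :
    PySem.Dict String String :=
  match st with
  | (methods, some cm, content) => methods.insert cm (PySem.Str.join "\n" content)
  | (methods, none, _) => methods

def extract_methods_map (code_block : String) : List (String × String) :=
  let lines := (PySem.Str.split? code_block "\n").getD []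
  (pvFinA (lines.foldl pvStepA (PySem.Dict.empty, none, []))).items

-- ===== PORT B =====
def pvIsDef (line : String) : Bool := PySem.Str.startswith (PySem.Str.strip line) "def "

-- B's first while loop: drop lines until the first def line
def pvSkip : List String → List String
  | [] => []
  | l :: rest => if pvIsDef l then l :: rest else pvSkip rest

-- B's inner while loop: (non-blank body lines consumed, leftover starting at the next def line)
def pvBody : List String → List String × List String
  | [] => ([], [])
  | l :: rest =>
    if pvIsDef l then ([], l :: rest)
    else
      let (b, r) := pvBody rest
      (if PySem.Str.strip l != "" then l :: b else b, r)

theorem pvBody_snd_len : ∀ ls : List String, (pvBody ls).2.length ≤ ls.length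
  | [] => Nat.le_refl _
  | l :: rest => by
    simp only [pvBody]
    split
    · simp
    · exact Nat.le_succ_of_le (pvBody_snd_len rest)

-- B's outer while loop: one method per iteration
def pvBuild (d : PySem.Dict String String) : List String → PySem.Dict String String
  | [] => d
  | header :: rest =>
    pvBuild (d.insert (PySem.Str.strip header)
        (PySem.Str.join "\n" (header :: (pvBody rest).1))) (pvBody rest).2
termination_by ls => ls.length
decreasing_by exact Nat.lt_succ_of_le (pvBody_snd_len rest)

def extract_methods_map_alt (code_block : String) : List (String × String) :=
  (pvBuild PySem.Dict.empty (pvSkip ((PySem.Str.split? code_block "\n").getD []))).items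

-- ===== PRECONDITION & SPEC =====
def Spec_extract_methods_map (code_block : String) (out : List (String × String)) : Prop := out = extract_methods_map_alt code_block
instance (code_block : String) (out : List (String × String)) : Decidable (Spec_extract_methods_map code_block out) := by unfold Spec_extract_methods_map; infer_instance

-- ===== CLAIM (what is proved, stated in full; the proofs are below) =====
def Claim_equal_extract_methods_map : Prop := ∀ (code_block : String), Dom_extract_methods_map code_block → Spec_extract_methods_map code_block (extract_methods_map code_block)

-- ===== LEMMAS AND PROOFS =====

-- unfolding lemmas for B's loops, stated in terms of pvIsDef / PySem.Str.strip
theorem pvBody_cons_def {l : String} (rest : List String) (h : pvIsDef l = true) :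
    pvBody (l :: rest) = ([], l :: rest) := by
  simp only [pvBody, h, if_true]

theorem pvBody_cons_blank {l : String} (rest : List String) (h : pvIsDef l = false)
    (hb : PySem.Str.strip l = "") :
    pvBody (l :: rest) = pvBody rest := by
  simp only [pvBody, h, hb, Bool.false_eq_true, if_false, bne_self_eq_false]

theorem pvBody_cons_keep {l : String} (rest : List String) (h : pvIsDef l = false)
    (hb : ¬ PySem.Str.strip l = "") :
    pvBody (l :: rest) = (l :: (pvBody rest).1, (pvBody rest).2) := by
  have hb' : (PySem.Str.strip l != "") = true := by simpa using hb
  simp only [pvBody, h, hb', Bool.false_eq_true, if_false, if_true]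

theorem pvSkip_cons_def {l : String} (rest : List String) (h : pvIsDef l = true) :
    pvSkip (l :: rest) = l :: rest := by
  simp only [pvSkip, h, if_true]

theorem pvSkip_cons_skip {l : String} (rest : List String) (h : pvIsDef l = false) :
    pvSkip (l :: rest) = pvSkip rest := by
  simp only [pvSkip, h, Bool.false_eq_true, if_false]

theorem pvBuild_cons (d : PySem.Dict String String) (header : String) (rest : List String) :
    pvBuild d (header :: rest) =
      pvBuild (d.insert (PySem.Str.strip header)
        (PySem.Str.join "\n" (header :: (pvBody rest).1))) (pvBody rest).2 := by
  rw [pvBuild]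

-- unfolding lemmas for A's loop body, one per branch
theorem pvStepA_some_def (d : PySem.Dict String String) (sig : String) (content : List String)
    {l : String} (h : pvIsDef l = true) :
    pvStepA (d, some sig, content) l =
      (d.insert sig (PySem.Str.join "\n" content), some (PySem.Str.strip l), [l]) := by
  simp only [pvIsDef] at h
  simp only [pvStepA, h, if_true]

theorem pvStepA_none_def (d : PySem.Dict String String) (content : List String)
    {l : String} (h : pvIsDef l = true) :
    pvStepA (d, none, content) l = (d, some (PySem.Str.strip l), [l]) := by
  simp only [pvIsDef] at h
  simp only [pvStepA, h, if_true]

theorem pvStepA_some_keep (d : PySem.Dict String String) (sig : String) (content : List String)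
    {l : String} (h : pvIsDef l = false) (hb : ¬ PySem.Str.strip l = "") :
    pvStepA (d, some sig, content) l = (d, some sig, content ++ [l]) := by
  simp only [pvIsDef] at h
  have hb' : (PySem.Str.strip l != "") = true := by simpa using hb
  simp only [pvStepA, h, hb', Bool.false_eq_true, if_false, Option.isSome_some, Bool.true_and,
    if_true]

theorem pvStepA_some_blank (d : PySem.Dict String String) (sig : String) (content : List String)
    {l : String} (hb : PySem.Str.strip l = "") :
    pvStepA (d, some sig, content) l = (d, some sig, content) := by
  simp only [pvStepA, hb, bne_self_eq_false, Bool.and_false, Bool.false_eq_true, if_false]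
  rw [if_neg (by decide)]

theorem pvStepA_none_skip (d : PySem.Dict String String) (content : List String)
    {l : String} (h : pvIsDef l = false) :
    pvStepA (d, none, content) l = (d, none, content) := by
  simp only [pvIsDef] at h
  simp only [pvStepA, h, Bool.false_eq_true, if_false, Option.isSome_none, Bool.false_and]

-- A's loop from a "currently inside a method" state equals: finish collecting this body, then pvBuild the rest
theorem pvLoop_some (ls : List String) : ∀ (d : PySem.Dict String String) (sig : String)
    (content : List String),
    pvFinA (ls.foldl pvStepA (d, some sig, content)) =
      pvBuild (d.insert sig (PySem.Str.join "\n" (content ++ (pvBody ls).1))) (pvBody ls).2 := by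
  induction ls with
  | nil => intro d sig content; simp [pvBody, pvFinA, pvBuild]
  | cons l rest ih =>
    intro d sig content
    by_cases hdef : pvIsDef l = true
    · rw [List.foldl_cons, pvStepA_some_def d sig content hdef, ih,
        pvBody_cons_def rest hdef, pvBuild_cons]
      simp
    · rw [Bool.not_eq_true] at hdef
      by_cases hblank : PySem.Str.strip l = ""
      · rw [List.foldl_cons, pvStepA_some_blank d sig content hblank, ih,
          pvBody_cons_blank rest hdef hblank]
      · rw [List.foldl_cons, pvStepA_some_keep d sig content hdef hblank, ih,
          pvBody_cons_keep rest hdef hblank]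
        simp [List.append_assoc]

-- A's loop from the initial "no method yet" state equals pvBuild after pvSkip
theorem pvLoop_none (ls : List String) : ∀ (d : PySem.Dict String String) (content : List String),
    pvFinA (ls.foldl pvStepA (d, none, content)) = pvBuild d (pvSkip ls) := by
  induction ls with
  | nil => intro d content; simp [pvFinA, pvSkip, pvBuild]
  | cons l rest ih =>
    intro d content
    by_cases hdef : pvIsDef l = true
    · rw [List.foldl_cons, pvStepA_none_def d content hdef, pvLoop_some,
        pvSkip_cons_def rest hdef, pvBuild_cons]
      simp
    · rw [Bool.not_eq_true] at hdef
      rw [List.foldl_cons, pvStepA_none_skip d content hdef, ih, pvSkip_cons_skip rest hdef]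

-- ===== VERDICT (by name: the statement is the Claim_ definition above) =====
theorem extract_methods_map_spec : Claim_equal_extract_methods_map := by
  intro code_block _
  unfold Spec_extract_methods_map extract_methods_map extract_methods_map_alt
  show (pvFinA (((PySem.Str.split? code_block "\n").getD []).foldl pvStepA
      (PySem.Dict.empty, none, []))).items = _
  rw [pvLoop_none]
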